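-- pv_equiv track=rewrite | github.com/tobeyOguney/Zoo-of-Algorithms | Subarray Sort/solution.py | get_range
-- ===== SOURCE A (Python) =====
-- def get_range(lis, min_val, max_val):
--     first_idx = None
--     last_idx = None
--
--     for i in range(len(lis)):
--         if min_val < lis[i]:
--             first_idx = i
--             break
--
--     for i in range(len(lis))[::-1]:
--         if max_val > lis[i]:
--             last_idx = i
--             break
--
--     return [first_idx, last_idx]
-- ===== SOURCE B (Python) =====
-- def get_range(lis, min_val, max_val):
--     first_idx = None
--     last_idx = None
--     for i, x in enumerate(lis):
--         if first_idx is None and min_val < x: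
--             first_idx = i
--         if max_val > x:
--             last_idx = i
--     return [first_idx, last_idx]
-- ===== Notes on version B (the rewrite author's own statement) =====
-- stated objective: alternative
-- what changed: Replaced A's two separate index scans (forward with break, reversed with break) by one forward enumerate pass that records the first qualifying index once and overwrites the last qualifying index on every match.
import Mathlib
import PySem

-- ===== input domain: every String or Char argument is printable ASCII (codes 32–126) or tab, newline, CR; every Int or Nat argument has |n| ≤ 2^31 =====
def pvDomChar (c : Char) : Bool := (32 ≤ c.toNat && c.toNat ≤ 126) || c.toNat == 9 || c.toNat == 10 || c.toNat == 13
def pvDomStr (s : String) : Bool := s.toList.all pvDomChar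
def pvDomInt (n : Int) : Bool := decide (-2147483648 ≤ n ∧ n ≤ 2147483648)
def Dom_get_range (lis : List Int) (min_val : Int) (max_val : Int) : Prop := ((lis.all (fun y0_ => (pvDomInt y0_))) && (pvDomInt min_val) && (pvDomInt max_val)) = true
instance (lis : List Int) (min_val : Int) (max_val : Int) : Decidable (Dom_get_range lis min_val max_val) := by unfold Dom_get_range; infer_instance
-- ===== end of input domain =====

-- B replaces A's two index scans (forward-with-break and reversed-with-break) by a single
-- forward pass over enumerate that sets first_idx once and overwrites last_idx on every match.


-- ===== PORT A =====
-- A's 'for i in …: if p i: idx = i; break' loop: first index in the list satisfying p.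
def pvScanBreak (p : Int → Bool) : List Int → Option Int
  | [] => none
  | i :: rest => if p i then some i else pvScanBreak p rest

def get_range (lis : List Int) (min_val : Int) (max_val : Int) : List (Option Int) :=
  -- for i in range(len(lis)): if min_val < lis[i]: first_idx = i; break
  let first_idx := pvScanBreak (fun i => decide (min_val < PySem.List.pyGetD lis i 0))
      (PySem.List.pyRange 0 lis.length 1)
  -- for i in range(len(lis))[::-1]: if max_val > lis[i]: last_idx = i; break
  let last_idx := pvScanBreak (fun i => decide (max_val > PySem.List.pyGetD lis i 0))
      ((PySem.List.slice? (PySem.List.pyRange 0 lis.length 1) none none (-1)).getD [])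
  [first_idx, last_idx]

-- ===== PORT B =====
def get_range_alt (lis : List Int) (min_val : Int) (max_val : Int) : List (Option Int) :=
  let r := (PySem.List.enumerate lis 0).foldl
    (fun (acc : Option Int × Option Int) ix =>
      let f := if acc.1 = none ∧ min_val < ix.2 then some ix.1 else acc.1
      let l := if max_val > ix.2 then some ix.1 else acc.2
      (f, l))
    (none, none)
  [r.1, r.2]

-- ===== PRECONDITION & SPEC =====
def Spec_get_range (lis : List Int) (min_val : Int) (max_val : Int) (out : List (Option Int)) : Prop := out = get_range_alt lis min_val max_val
instance (lis : List Int) (min_val : Int) (max_val : Int) (out : List (Option Int)) : Decidable (Spec_get_range lis min_val max_val out) := by unfold Spec_get_range; infer_instance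

-- ===== CLAIM (what is proved, stated in full; the proofs are below) =====
def Claim_equal_get_range : Prop := ∀ (lis : List Int) (min_val : Int) (max_val : Int), Dom_get_range lis min_val max_val → Spec_get_range lis min_val max_val (get_range lis min_val max_val)

-- ===== LEMMAS AND PROOFS =====

-- canonical middle specs
def pvFirstIdx (min_val : Int) : List Int → Int → Option Int
  | [], _ => none
  | x :: r, s => if min_val < x then some s else pvFirstIdx min_val r (s + 1)

def pvLastIdx (max_val : Int) : List Int → Int → Option Int
  | [], _ => none
  | x :: r, s =>
    match pvLastIdx max_val r (s + 1) with
    | some j => some j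
    | none => if max_val > x then some s else none

lemma pvScanBreak_append_singleton (p : Int → Bool) (l : List Int) (a : Int) :
    pvScanBreak p (l ++ [a]) =
      match pvScanBreak p l with
      | some j => some j
      | none => if p a then some a else none := by
  induction l with
  | nil => simp [pvScanBreak]
  | cons x r ih =>
    by_cases h : p x <;> simp [pvScanBreak, h, ih]

lemma pvScanBreak_first (lis : List Int) (min_val : Int) :
    ∀ (n : Nat) (s : Nat), s + n = lis.length →
      pvScanBreak (fun i => decide (min_val < PySem.List.pyGetD lis i 0))
        (PySem.List.pyRange (s : Int) (lis.length : Int) 1)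
        = pvFirstIdx min_val (lis.drop s) (s : Int) := by
  intro n
  induction n with
  | zero =>
    intro s hs
    rw [PySem.List.pyRange_one_eq_nil (by omega)]
    rw [List.drop_of_length_le (by omega)]
    simp [pvScanBreak, pvFirstIdx]
  | succ m ih =>
    intro s hs
    have hlt : s < lis.length := by omega
    rw [PySem.List.pyRange_one_cons (by exact_mod_cast hlt)]
    rw [List.drop_eq_getElem_cons hlt]
    simp only [pvScanBreak, pvFirstIdx, PySem.List.pyGetD_natCast, List.getD_eq_getElem?_getD,
      List.getElem?_eq_getElem hlt, Option.getD_some]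
    by_cases h : min_val < lis[s]
    · simp [h]
    · simp only [h, decide_false, if_neg, Bool.false_eq_true, not_false_iff]
      have := ih (s + 1) (by omega)
      rw [show ((s : Int) + 1) = ((s + 1 : Nat) : Int) by push_cast; ring]
      exact this

lemma pvScanBreak_last (lis : List Int) (max_val : Int) :
    ∀ (n : Nat) (s : Nat), s + n = lis.length →
      pvScanBreak (fun i => decide (max_val > PySem.List.pyGetD lis i 0))
        (PySem.List.pyRange (s : Int) (lis.length : Int) 1).reverse
        = pvLastIdx max_val (lis.drop s) (s : Int) := by
  intro n
  induction n with
  | zero =>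
    intro s hs
    rw [PySem.List.pyRange_one_eq_nil (by omega)]
    rw [List.drop_of_length_le (by omega)]
    simp [pvScanBreak, pvLastIdx]
  | succ m ih =>
    intro s hs
    have hlt : s < lis.length := by omega
    rw [PySem.List.pyRange_one_cons (by exact_mod_cast hlt)]
    rw [List.drop_eq_getElem_cons hlt]
    simp only [List.reverse_cons]
    rw [pvScanBreak_append_singleton]
    have hrec := ih (s + 1) (by omega)
    rw [show ((s : Int) + 1) = ((s + 1 : Nat) : Int) by push_cast; ring] at *
    rw [hrec]
    simp only [pvLastIdx, PySem.List.pyGetD_natCast, List.getD_eq_getElem?_getD,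
      List.getElem?_eq_getElem hlt, Option.getD_some]
    rw [show ((s : Int) + 1) = ((s + 1 : Nat) : Int) by push_cast; ring]
    cases pvLastIdx max_val (lis.drop (s + 1)) ((s + 1 : Nat) : Int) with
    | none => simp
    | some j => simp

lemma pvFold_B (min_val max_val : Int) :
    ∀ (xs : List Int) (s : Int) (f0 l0 : Option Int),
      (PySem.List.enumerate xs s).foldl
        (fun (acc : Option Int × Option Int) ix =>
          let f := if acc.1 = none ∧ min_val < ix.2 then some ix.1 else acc.1
          let l := if max_val > ix.2 then some ix.1 else acc.2
          (f, l))
        (f0, l0)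
      = ((match f0 with | none => pvFirstIdx min_val xs s | some v => some v),
         (match pvLastIdx max_val xs s with | some j => some j | none => l0)) := by
  intro xs
  induction xs with
  | nil => intro s f0 l0; cases f0 <;> simp [PySem.List.enumerate_nil, pvFirstIdx, pvLastIdx]
  | cons x r ih =>
    intro s f0 l0
    rw [PySem.List.enumerate_cons]
    simp only [List.foldl_cons]
    rw [ih]
    cases f0 with
    | none =>
      simp only [pvFirstIdx, pvLastIdx]
      by_cases h1 : min_val < x <;> by_cases h2 : max_val > x <;>
        simp [h1, h2] <;>
        cases pvLastIdx max_val r (s + 1) <;> simp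
    | some v =>
      simp only [pvLastIdx]
      by_cases h2 : max_val > x <;>
        simp [h2] <;>
        cases pvLastIdx max_val r (s + 1) <;> simp

-- ===== VERDICT (by name: the statement is the Claim_ definition above) =====
theorem get_range_spec : Claim_equal_get_range := by
  intro lis min_val max_val _
  unfold Spec_get_range get_range get_range_alt
  rw [pvFold_B min_val max_val lis 0 none none]
  have hrev : (PySem.List.slice? (PySem.List.pyRange 0 (lis.length : Int) 1) none none (-1)).getD []
      = (PySem.List.pyRange 0 (lis.length : Int) 1).reverse := by
    rw [PySem.List.slice?_none_none_neg_one]; rfl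
  rw [hrev]
  have h1 := pvScanBreak_first lis min_val lis.length 0 (by omega)
  have h2 := pvScanBreak_last lis max_val lis.length 0 (by omega)
  simp only [Nat.cast_zero, List.drop_zero] at h1 h2
  rw [h1, h2]
  cases hf : pvFirstIdx min_val lis 0 <;> cases hl : pvLastIdx max_val lis 0 <;> simp
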